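-- pv_equiv track=rewrite | github.com/Hoyby/aoc2022 | day18/main.py | extExposed
-- ===== SOURCE A (Python) =====
-- from collections import deque
--
-- def extExposed(pos, cubes, min_coord, max_coord):
--     stack = deque([pos])
--     visited = set()
--
--     while len(stack) > 0:
--         pop = stack.popleft()
--
--         if pop in cubes:
--             continue
--
--         for coord in range(3):
--             if not (min_coord <= pop[coord] <= max_coord):
--                 return True
--
--         if pop in visited:
--             continue
--         visited.add(pop)
--
--         for neighbor in getNeigbors(pop):
--             if neighbor not in visited:
--                 stack.append(neighbor)
--
--     return False
--
-- def getNeigbors(pos):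
--     neighbors = [
--         (pos[0] + 1, pos[1], pos[2]),
--         (pos[0] - 1, pos[1], pos[2]),
--         (pos[0], pos[1] + 1, pos[2]),
--         (pos[0], pos[1] - 1, pos[2]),
--         (pos[0], pos[1], pos[2] + 1),
--         (pos[0], pos[1], pos[2] - 1),
--     ]
--     return neighbors
-- ===== SOURCE B (Python) =====
-- def extExposed(pos, cubes, min_coord, max_coord):
--     visited = set()
--
--     def dfs(p):
--         if p in cubes:
--             return False
--         for coord in range(3):
--             if not (min_coord <= p[coord] <= max_coord):
--                 return True
--         if p in visited:
--             return False
--         visited.add(p)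
--         for n in ((p[0] + 1, p[1], p[2]), (p[0] - 1, p[1], p[2]),
--                   (p[0], p[1] + 1, p[2]), (p[0], p[1] - 1, p[2]),
--                   (p[0], p[1], p[2] + 1), (p[0], p[1], p[2] - 1)):
--             if dfs(n):
--                 return True
--         return False
--
--     return dfs(pos)
-- ===== Notes on version B (the rewrite author's own statement) =====
-- stated objective: alternative
-- what changed: Replaces A's iterative breadth-first flood fill (a deque worklist with cells possibly enqueued repeatedly and all checks done when popped) by a recursive depth-first search: an inner dfs(p) closure short-circuits True as soon as any recursive branch escapes the box, sharing one visited set across calls; there is no queue and no loop over a worklist at all.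
import Mathlib
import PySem

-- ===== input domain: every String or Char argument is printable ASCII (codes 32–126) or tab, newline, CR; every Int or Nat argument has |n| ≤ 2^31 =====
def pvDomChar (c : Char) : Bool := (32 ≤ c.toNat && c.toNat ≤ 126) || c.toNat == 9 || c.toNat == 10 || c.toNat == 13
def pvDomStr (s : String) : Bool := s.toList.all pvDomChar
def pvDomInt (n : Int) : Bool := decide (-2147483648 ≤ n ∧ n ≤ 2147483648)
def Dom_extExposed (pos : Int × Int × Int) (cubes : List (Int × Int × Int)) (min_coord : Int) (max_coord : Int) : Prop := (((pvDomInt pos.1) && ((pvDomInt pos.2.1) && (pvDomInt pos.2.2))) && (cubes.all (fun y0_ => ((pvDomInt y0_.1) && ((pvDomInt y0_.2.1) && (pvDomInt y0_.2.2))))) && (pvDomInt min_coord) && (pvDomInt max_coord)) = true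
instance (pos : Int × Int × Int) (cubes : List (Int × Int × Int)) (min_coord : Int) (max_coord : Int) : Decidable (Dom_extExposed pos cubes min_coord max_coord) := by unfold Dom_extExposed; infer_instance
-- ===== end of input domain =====

-- B replaces A's iterative breadth-first flood fill (deque worklist, checks done at pop time,
-- cells possibly enqueued repeatedly) by a recursive depth-first search: an inner dfs(p) that
-- short-circuits True as soon as one branch escapes the box, threading one shared visited set.

-- shared literal helpers: the 6 axis neighbors (A's getNeigbors / B's inline tuple list) and the
-- bounds test (both sides' unrolled 'for coord in range(3)' check)
def pvNbrs (p : Int × Int × Int) : List (Int × Int × Int) :=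
  [(p.1 + 1, p.2.1, p.2.2), (p.1 - 1, p.2.1, p.2.2),
   (p.1, p.2.1 + 1, p.2.2), (p.1, p.2.1 - 1, p.2.2),
   (p.1, p.2.1, p.2.2 + 1), (p.1, p.2.1, p.2.2 - 1)]

def pvInB (lo hi : Int) (p : Int × Int × Int) : Bool :=
  decide (lo ≤ p.1 ∧ p.1 ≤ hi) && decide (lo ≤ p.2.1 ∧ p.2.1 ≤ hi) && decide (lo ≤ p.2.2 ∧ p.2.2 ≤ hi)

-- fuel: a totality guard only; it provably always suffices (it exceeds 6 * |box| + 1, see box_card)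
def pvFuelFor (lo hi : Int) : Nat := 6 * ((hi + 1 - lo).toNat) ^ 3 + 2

-- ===== PORT A =====
def extExposedLoopA (cubes : List (Int × Int × Int)) (lo hi : Int) :
    Nat → List (Int × Int × Int) → PySem.Set (Int × Int × Int) → Bool
  | 0, _, _ => false
  | _ + 1, [], _ => false                    -- while-loop exits: return False
  | fuel + 1, p :: rest, visited =>
    if p ∈ cubes then extExposedLoopA cubes lo hi fuel rest visited
    else if pvInB lo hi p = false then true
    else if p ∈ visited then extExposedLoopA cubes lo hi fuel rest visited
    else
      let v' := PySem.Set.add visited p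
      extExposedLoopA cubes lo hi fuel (rest ++ (pvNbrs p).filter (fun n => n ∉ v')) v'

def extExposed (pos : Int × Int × Int) (cubes : List (Int × Int × Int)) (min_coord : Int) (max_coord : Int) : Bool :=
  extExposedLoopA cubes min_coord max_coord (pvFuelFor min_coord max_coord) [pos] PySem.Set.empty

-- ===== PORT B =====
-- dfsB = the recursive dfs(p); dfsL = its 'for n in …: if dfs(n): return True' loop,
-- parametrized by the recursive call. The shared mutable 'visited' set is threaded as state.
def dfsL (dfs : (Int × Int × Int) → PySem.Set (Int × Int × Int) →
      Bool × PySem.Set (Int × Int × Int)) :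
    List (Int × Int × Int) → PySem.Set (Int × Int × Int) →
    Bool × PySem.Set (Int × Int × Int)
  | [], v => (false, v)
  | n :: ns, v =>
    match dfs n v with
    | (true, v') => (true, v')
    | (false, v') => dfsL dfs ns v'

def dfsB (cubes : List (Int × Int × Int)) (lo hi : Int) :
    Nat → (Int × Int × Int) → PySem.Set (Int × Int × Int) →
    Bool × PySem.Set (Int × Int × Int)
  | 0, _, v => (false, v)
  | fuel + 1, p, v =>
    if p ∈ cubes then (false, v)
    else if pvInB lo hi p = false then (true, v)
    else if p ∈ v then (false, v)
    else dfsL (dfsB cubes lo hi fuel) (pvNbrs p) (PySem.Set.add v p)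

def extExposed_alt (pos : Int × Int × Int) (cubes : List (Int × Int × Int)) (min_coord : Int) (max_coord : Int) : Bool :=
  (dfsB cubes min_coord max_coord (pvFuelFor min_coord max_coord) pos PySem.Set.empty).1

-- ===== PRECONDITION & SPEC =====
def Spec_extExposed (pos : Int × Int × Int) (cubes : List (Int × Int × Int)) (min_coord : Int) (max_coord : Int) (out : Bool) : Prop := out = extExposed_alt pos cubes min_coord max_coord
instance (pos : Int × Int × Int) (cubes : List (Int × Int × Int)) (min_coord : Int) (max_coord : Int) (out : Bool) : Decidable (Spec_extExposed pos cubes min_coord max_coord out) := by unfold Spec_extExposed; infer_instance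

-- ===== CLAIM (what is proved, stated in full; the proofs are below) =====
def Claim_equal_extExposed : Prop := ∀ (pos : Int × Int × Int) (cubes : List (Int × Int × Int)) (min_coord : Int) (max_coord : Int), Dom_extExposed pos cubes min_coord max_coord → Spec_extExposed pos cubes min_coord max_coord (extExposed pos cubes min_coord max_coord)

-- ===== LEMMAS AND PROOFS =====

-- the common specification: a free (non-cube) cell outside the box is reachable from pos through
-- free in-box cells
inductive Reach (cubes : List (Int × Int × Int)) (lo hi : Int) (pos : Int × Int × Int) :
    (Int × Int × Int) → Prop
  | refl : Reach cubes lo hi pos pos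
  | step {c n : Int × Int × Int} : Reach cubes lo hi pos c → c ∉ cubes → pvInB lo hi c = true →
      n ∈ pvNbrs c → Reach cubes lo hi pos n

def Escape (cubes : List (Int × Int × Int)) (lo hi : Int) (pos : Int × Int × Int) : Prop :=
  ∃ c, Reach cubes lo hi pos c ∧ c ∉ cubes ∧ pvInB lo hi c = false

noncomputable def pvBox (lo hi : Int) : Finset (Int × Int × Int) :=
  Finset.Icc lo hi ×ˢ (Finset.Icc lo hi ×ˢ Finset.Icc lo hi)

lemma mem_pvBox {lo hi : Int} {p : Int × Int × Int} : p ∈ pvBox lo hi ↔ pvInB lo hi p = true := by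
  simp [pvBox, pvInB, Finset.mem_product, and_assoc]

-- the fuel measure: free in-box cells not yet visited
noncomputable def pvRem (lo hi : Int) (seen : List (Int × Int × Int)) : Nat :=
  (pvBox lo hi \ seen.toFinset).card

lemma pvRem_add {lo hi : Int} {p : Int × Int × Int} {seen : List (Int × Int × Int)}
    (hb : pvInB lo hi p = true) (hns : p ∉ seen) :
    pvRem lo hi (seen ++ [p]) + 1 = pvRem lo hi seen := by
  have h1 : (seen ++ [p]).toFinset = insert p seen.toFinset := by
    rw [List.toFinset_append]
    simp [Finset.union_singleton]
  have hmem : p ∈ pvBox lo hi \ seen.toFinset := by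
    simp [Finset.mem_sdiff, mem_pvBox, hb, List.mem_toFinset, hns]
  unfold pvRem
  rw [h1, Finset.sdiff_insert, Finset.card_erase_of_mem hmem]
  exact Nat.sub_add_cancel (Finset.card_pos.mpr ⟨p, hmem⟩)

lemma pvRem_mono {lo hi : Int} {s t : List (Int × Int × Int)} (h : ∀ x ∈ s, x ∈ t) :
    pvRem lo hi t ≤ pvRem lo hi s := by
  unfold pvRem
  refine Finset.card_le_card (Finset.sdiff_subset_sdiff (Finset.Subset.refl _) ?_)
  intro x hx
  simp only [List.mem_toFinset] at hx ⊢
  exact h x hx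

lemma set_add_of_not_mem {p : Int × Int × Int} {s : PySem.Set (Int × Int × Int)} (h : p ∉ s) :
    PySem.Set.add s p = s ++ [p] := by
  simp [PySem.Set.add, PySem.Set.contains]
  intro hc
  exact absurd hc h

-- ---------- A: soundness ----------
lemma A_sound (cubes : List (Int × Int × Int)) (lo hi : Int) (pos : Int × Int × Int) :
    ∀ (fuel : Nat) (stack visited : List (Int × Int × Int)),
      (∀ s ∈ stack, Reach cubes lo hi pos s) →
      extExposedLoopA cubes lo hi fuel stack visited = true → Escape cubes lo hi pos := by
  intro fuel
  induction fuel with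
  | zero => intro stack visited _ h; simp [extExposedLoopA] at h
  | succ n ih =>
    intro stack visited hs h
    match stack with
    | [] => simp [extExposedLoopA] at h
    | p :: rest =>
      rw [extExposedLoopA] at h
      by_cases hc : p ∈ cubes
      · simp only [hc, if_true] at h
        exact ih rest visited (fun s hm => hs s (List.mem_cons_of_mem _ hm)) h
      · simp only [hc, if_false] at h
        by_cases hb : pvInB lo hi p = false
        · exact ⟨p, hs p List.mem_cons_self, hc, hb⟩
        · simp only [hb] at h
          have hpb : pvInB lo hi p = true := by
            cases hx : pvInB lo hi p with
            | false => exact absurd hx hb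
            | true => rfl
          have hpr : Reach cubes lo hi pos p := hs p List.mem_cons_self
          by_cases hv : p ∈ visited
          · simp only [hv, if_true] at h
            exact ih rest visited (fun s hm => hs s (List.mem_cons_of_mem _ hm)) h
          · simp only [hv, if_false] at h
            refine ih _ _ ?_ h
            intro s hm
            rcases List.mem_append.mp hm with hm | hm
            · exact hs s (List.mem_cons_of_mem _ hm)
            · exact Reach.step hpr hc hpb (List.mem_of_mem_filter hm)

-- ---------- closure at termination implies no escape ----------
lemma closed_no_escape (cubes : List (Int × Int × Int)) (lo hi : Int) (pos : Int × Int × Int)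
    (visited : List (Int × Int × Int))
    (hgood : ∀ v ∈ visited, v ∉ cubes ∧ pvInB lo hi v = true)
    (hcl : ∀ v ∈ visited, ∀ n ∈ pvNbrs v, n ∈ cubes ∨ n ∈ visited)
    (hpos : pos ∈ cubes ∨ pos ∈ visited) :
    ¬ Escape cubes lo hi pos := by
  have key : ∀ c, Reach cubes lo hi pos c → c ∈ cubes ∨ c ∈ visited := by
    intro c hr
    induction hr with
    | refl => exact hpos
    | step hr hfc hbc hn ih =>
      rcases ih with h | h
      · exact absurd h hfc
      · exact hcl _ h _ hn
  rintro ⟨e, hre, hfe, hbe⟩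
  rcases key e hre with h | h
  · exact hfe h
  · rw [(hgood e h).2] at hbe; exact Bool.true_eq_false.mp hbe

-- ---------- A: completeness ----------
lemma A_complete (cubes : List (Int × Int × Int)) (lo hi : Int) (pos : Int × Int × Int) :
    ∀ (fuel : Nat) (stack visited : List (Int × Int × Int)),
      6 * pvRem lo hi visited + stack.length ≤ fuel →
      (∀ v ∈ visited, v ∉ cubes ∧ pvInB lo hi v = true) →
      (∀ v ∈ visited, ∀ n ∈ pvNbrs v, n ∈ cubes ∨ n ∈ visited ∨ n ∈ stack) →
      (pos ∈ cubes ∨ pos ∈ visited ∨ pos ∈ stack) →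
      extExposedLoopA cubes lo hi fuel stack visited = false → ¬ Escape cubes lo hi pos := by
  intro fuel
  induction fuel with
  | zero =>
    intro stack visited hm hgood hcl hpos _
    have hst : stack = [] := List.eq_nil_of_length_eq_zero (by omega)
    subst hst
    refine closed_no_escape cubes lo hi pos visited hgood ?_ ?_
    · intro v hv n hn
      rcases hcl v hv n hn with h | h | h
      · exact Or.inl h
      · exact Or.inr h
      · simp at h
    · rcases hpos with h | h | h
      · exact Or.inl h
      · exact Or.inr h
      · simp at h
  | succ m ih =>
    intro stack visited hm hgood hcl hpos h
    match stack with
    | [] =>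
      refine closed_no_escape cubes lo hi pos visited hgood ?_ ?_
      · intro v hv n hn
        rcases hcl v hv n hn with h' | h' | h'
        · exact Or.inl h'
        · exact Or.inr h'
        · simp at h'
      · rcases hpos with h' | h' | h'
        · exact Or.inl h'
        · exact Or.inr h'
        · simp at h'
    | p :: rest =>
      rw [extExposedLoopA] at h
      have hmrest : 6 * pvRem lo hi visited + rest.length ≤ m := by
        simp only [List.length_cons] at hm; omega
      by_cases hc : p ∈ cubes
      · simp only [hc, if_true] at h
        refine ih rest visited hmrest hgood ?_ ?_ h
        · intro v hv n hn
          rcases hcl v hv n hn with h' | h' | h'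
          · exact Or.inl h'
          · exact Or.inr (Or.inl h')
          · rcases List.mem_cons.mp h' with h'' | h''
            · exact Or.inl (h'' ▸ hc)
            · exact Or.inr (Or.inr h'')
        · rcases hpos with h' | h' | h'
          · exact Or.inl h'
          · exact Or.inr (Or.inl h')
          · rcases List.mem_cons.mp h' with h'' | h''
            · exact Or.inl (h'' ▸ hc)
            · exact Or.inr (Or.inr h'')
      · simp only [hc, if_false] at h
        by_cases hb : pvInB lo hi p = false
        · simp [hb] at h
        · simp only [hb] at h
          have hpb : pvInB lo hi p = true := by
            cases hx : pvInB lo hi p with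
            | false => exact absurd hx hb
            | true => rfl
          by_cases hv : p ∈ visited
          · simp only [hv, if_true] at h
            refine ih rest visited hmrest hgood ?_ ?_ h
            · intro v hv' n hn
              rcases hcl v hv' n hn with h' | h' | h'
              · exact Or.inl h'
              · exact Or.inr (Or.inl h')
              · rcases List.mem_cons.mp h' with h'' | h''
                · exact Or.inr (Or.inl (h'' ▸ hv))
                · exact Or.inr (Or.inr h'')
            · rcases hpos with h' | h' | h'
              · exact Or.inl h'
              · exact Or.inr (Or.inl h')
              · rcases List.mem_cons.mp h' with h'' | h''
                · exact Or.inr (Or.inl (h'' ▸ hv))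
                · exact Or.inr (Or.inr h'')
          · simp only [hv, if_false] at h
            have hadd : PySem.Set.add visited p = visited ++ [p] := set_add_of_not_mem hv
            rw [hadd] at h
            have hmemv' : ∀ x : Int × Int × Int, x ∈ visited ++ [p] ↔ x ∈ visited ∨ x = p := by
              intro x; simp
            have hcard := pvRem_add hpb hv
            have hmnew : 6 * pvRem lo hi (visited ++ [p]) +
                (rest ++ (pvNbrs p).filter (fun n => n ∉ visited ++ [p])).length ≤ m := by
              have hlen : ((pvNbrs p).filter (fun n => n ∉ visited ++ [p])).length ≤ 6 := by
                have := List.length_filter_le (fun n => n ∉ visited ++ [p]) (pvNbrs p)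
                simpa [pvNbrs] using this
              simp only [List.length_append, List.length_cons] at hm ⊢
              omega
            refine ih _ (visited ++ [p]) hmnew ?_ ?_ ?_ h
            · intro v hvm
              rcases (hmemv' v).mp hvm with h' | h'
              · exact hgood v h'
              · exact h' ▸ ⟨hc, hpb⟩
            · intro v hvm n hn
              rcases (hmemv' v).mp hvm with h' | h'
              · rcases hcl v h' n hn with h'' | h'' | h''
                · exact Or.inl h''
                · exact Or.inr (Or.inl ((hmemv' n).mpr (Or.inl h'')))
                · rcases List.mem_cons.mp h'' with h3 | h3
                  · exact Or.inr (Or.inl ((hmemv' n).mpr (Or.inr h3)))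
                  · exact Or.inr (Or.inr (List.mem_append.mpr (Or.inl h3)))
              · rw [h'] at hn
                by_cases hnv : n ∈ visited ++ [p]
                · exact Or.inr (Or.inl hnv)
                · refine Or.inr (Or.inr (List.mem_append.mpr (Or.inr ?_)))
                  exact List.mem_filter.mpr ⟨hn, by simpa using hnv⟩
            · rcases hpos with h' | h' | h'
              · exact Or.inl h'
              · exact Or.inr (Or.inl ((hmemv' pos).mpr (Or.inl h')))
              · rcases List.mem_cons.mp h' with h'' | h''
                · exact Or.inr (Or.inl ((hmemv' pos).mpr (Or.inr h'')))
                · exact Or.inr (Or.inr (List.mem_append.mpr (Or.inl h'')))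

-- ---------- B: soundness ----------
lemma B_sound_list (cubes : List (Int × Int × Int)) (lo hi : Int) (pos : Int × Int × Int)
    (dfs : (Int × Int × Int) → PySem.Set (Int × Int × Int) →
      Bool × PySem.Set (Int × Int × Int))
    (hSB : ∀ (p : Int × Int × Int) (v : PySem.Set (Int × Int × Int)),
      Reach cubes lo hi pos p → (dfs p v).1 = true → Escape cubes lo hi pos) :
    ∀ (ns : List (Int × Int × Int)) (v : PySem.Set (Int × Int × Int)),
      (∀ n ∈ ns, Reach cubes lo hi pos n) →
      (dfsL dfs ns v).1 = true → Escape cubes lo hi pos := by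
  intro ns
  induction ns with
  | nil => intro v _ h; simp [dfsL] at h
  | cons n ns ih =>
    intro v hr h
    rw [dfsL] at h
    cases hd : dfs n v with
    | mk b v' =>
      cases b with
      | true => exact hSB n v (hr n List.mem_cons_self) (by rw [hd])
      | false =>
        rw [hd] at h
        exact ih v' (fun x hx => hr x (List.mem_cons_of_mem _ hx)) h

lemma B_sound (cubes : List (Int × Int × Int)) (lo hi : Int) (pos : Int × Int × Int) :
    ∀ (fuel : Nat) (p : Int × Int × Int) (v : PySem.Set (Int × Int × Int)),
      Reach cubes lo hi pos p → (dfsB cubes lo hi fuel p v).1 = true → Escape cubes lo hi pos := by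
  intro fuel
  induction fuel with
  | zero => intro p v _ h; simp [dfsB] at h
  | succ m ih =>
    intro p v hr h
    rw [dfsB] at h
    by_cases hc : p ∈ cubes
    · simp [hc] at h
    · simp only [hc, if_false] at h
      by_cases hb : pvInB lo hi p = false
      · exact ⟨p, hr, hc, hb⟩
      · simp only [hb] at h
        have hpb : pvInB lo hi p = true := by
          cases hx : pvInB lo hi p with
          | false => exact absurd hx hb
          | true => rfl
        by_cases hv : p ∈ v
        · simp [hv] at h
        · simp only [hv, if_false] at h
          exact B_sound_list cubes lo hi pos (dfsB cubes lo hi m) ih (pvNbrs p) (PySem.Set.add v p)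
            (fun n hn => Reach.step hr hc hpb hn) h

-- ---------- B: completeness ----------
-- the dfs invariant: visited grows, stays free-and-in-box, and every cell it added has all its
-- neighbors in cubes ∪ visited by the time the call returns False
lemma B_complete_list (cubes : List (Int × Int × Int)) (lo hi : Int) (fuel : Nat)
    (dfs : (Int × Int × Int) → PySem.Set (Int × Int × Int) →
      Bool × PySem.Set (Int × Int × Int))
    (hCB : ∀ (p : Int × Int × Int) (v v' : List (Int × Int × Int)),
      pvRem lo hi v < fuel →
      (∀ x ∈ v, x ∉ cubes ∧ pvInB lo hi x = true) →
      dfs p v = (false, v') →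
      (∀ x ∈ v, x ∈ v') ∧ (∀ x ∈ v', x ∉ cubes ∧ pvInB lo hi x = true) ∧
      (p ∈ cubes ∨ p ∈ v') ∧
      (∀ x ∈ v', x ∈ v ∨ ∀ n ∈ pvNbrs x, n ∈ cubes ∨ n ∈ v')) :
    ∀ (ns : List (Int × Int × Int)) (v v' : List (Int × Int × Int)),
      pvRem lo hi v < fuel →
      (∀ x ∈ v, x ∉ cubes ∧ pvInB lo hi x = true) →
      dfsL dfs ns v = (false, v') →
      (∀ x ∈ v, x ∈ v') ∧ (∀ x ∈ v', x ∉ cubes ∧ pvInB lo hi x = true) ∧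
      (∀ n ∈ ns, n ∈ cubes ∨ n ∈ v') ∧
      (∀ x ∈ v', x ∈ v ∨ ∀ n ∈ pvNbrs x, n ∈ cubes ∨ n ∈ v') := by
  intro ns
  induction ns with
  | nil =>
    intro v v' _ hgood h
    simp only [dfsL] at h
    have h2 : v = v' := congrArg Prod.snd h
    subst h2
    exact ⟨fun x hx => hx, hgood, by simp, fun x hx => Or.inl hx⟩
  | cons n ns ih =>
    intro v v' hf hgood h
    rw [dfsL] at h
    cases hd : dfs n v with
    | mk b v1 =>
      cases b with
      | true => rw [hd] at h; simp at h
      | false =>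
        rw [hd] at h
        obtain ⟨m1, g1, hn1, cl1⟩ := hCB n v v1 hf hgood hd
        have hf1 : pvRem lo hi v1 < fuel := lt_of_le_of_lt (pvRem_mono m1) hf
        obtain ⟨m2, g2, hns2, cl2⟩ := ih v1 v' hf1 g1 h
        refine ⟨fun x hx => m2 x (m1 x hx), g2, ?_, ?_⟩
        · intro x hx
          rcases List.mem_cons.mp hx with h' | h'
          · subst h'
            rcases hn1 with h'' | h''
            · exact Or.inl h''
            · exact Or.inr (m2 x h'')
          · exact hns2 x h'
        · intro x hx
          rcases cl2 x hx with h' | h'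
          · rcases cl1 x h' with h'' | h''
            · exact Or.inl h''
            · refine Or.inr (fun nn hnn => ?_)
              rcases h'' nn hnn with h3 | h3
              · exact Or.inl h3
              · exact Or.inr (m2 nn h3)
          · exact Or.inr h'

lemma B_complete (cubes : List (Int × Int × Int)) (lo hi : Int) :
    ∀ (fuel : Nat) (p : Int × Int × Int) (v v' : List (Int × Int × Int)),
      pvRem lo hi v < fuel →
      (∀ x ∈ v, x ∉ cubes ∧ pvInB lo hi x = true) →
      dfsB cubes lo hi fuel p v = (false, v') →
      (∀ x ∈ v, x ∈ v') ∧ (∀ x ∈ v', x ∉ cubes ∧ pvInB lo hi x = true) ∧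
      (p ∈ cubes ∨ p ∈ v') ∧
      (∀ x ∈ v', x ∈ v ∨ ∀ n ∈ pvNbrs x, n ∈ cubes ∨ n ∈ v') := by
  intro fuel
  induction fuel with
  | zero => intro p v v' hf _ _; omega
  | succ m ih =>
    intro p v v' hf hgood h
    rw [dfsB] at h
    by_cases hc : p ∈ cubes
    · simp only [hc, if_true] at h
      have h2 : v = v' := congrArg Prod.snd h
      subst h2
      exact ⟨fun x hx => hx, hgood, Or.inl hc, fun x hx => Or.inl hx⟩
    · simp only [hc, if_false] at h
      by_cases hb : pvInB lo hi p = false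
      · simp [hb] at h
      · simp only [hb] at h
        have hpb : pvInB lo hi p = true := by
          cases hx : pvInB lo hi p with
          | false => exact absurd hx hb
          | true => rfl
        by_cases hv : p ∈ v
        · simp only [hv, if_true] at h
          have h2 : v = v' := congrArg Prod.snd h
          subst h2
          exact ⟨fun x hx => hx, hgood, Or.inr hv, fun x hx => Or.inl hx⟩
        · simp only [hv, if_false] at h
          rw [set_add_of_not_mem hv] at h
          have hcard := pvRem_add hpb hv
          have hf1 : pvRem lo hi (v ++ [p]) < m := by omega
          have hg1 : ∀ x ∈ v ++ [p], x ∉ cubes ∧ pvInB lo hi x = true := by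
            intro x hx
            rcases List.mem_append.mp hx with h' | h'
            · exact hgood x h'
            · have : x = p := by simpa using h'
              exact this ▸ ⟨hc, hpb⟩
          obtain ⟨m1, g1, hns1, cl1⟩ :=
            B_complete_list cubes lo hi m (dfsB cubes lo hi m) ih (pvNbrs p) (v ++ [p]) v' hf1 hg1 h
          have hpv' : p ∈ v' := m1 p (by simp)
          refine ⟨fun x hx => m1 x (by simp [hx]), g1, Or.inr hpv', ?_⟩
          intro x hx
          rcases cl1 x hx with h' | h'
          · rcases List.mem_append.mp h' with h'' | h''
            · exact Or.inl h''
            · have hxp : x = p := by simpa using h''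
              subst hxp
              exact Or.inr hns1
          · exact Or.inr h'

-- ---------- the fuel always suffices ----------
lemma box_card (lo hi : Int) : (pvBox lo hi).card = ((hi + 1 - lo).toNat) ^ 3 := by
  unfold pvBox
  rw [Finset.card_product, Finset.card_product, Int.card_Icc]
  ring

-- ---------- top level ----------
lemma A_iff (pos : Int × Int × Int) (cubes : List (Int × Int × Int)) (lo hi : Int) :
    (extExposed pos cubes lo hi = true ↔ Escape cubes lo hi pos) := by
  constructor
  · intro h
    exact A_sound cubes lo hi pos (pvFuelFor lo hi) [pos] PySem.Set.empty
      (by intro s hs; simp at hs; subst hs; exact Reach.refl) h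
  · intro hE
    cases hA : extExposed pos cubes lo hi with
    | true => rfl
    | false =>
      exfalso
      refine A_complete cubes lo hi pos (pvFuelFor lo hi) [pos] PySem.Set.empty ?_ ?_ ?_ ?_ hA hE
      · unfold pvRem PySem.Set.empty pvFuelFor
        simp only [List.toFinset_nil, Finset.sdiff_empty, List.length_cons, List.length_nil]
        rw [box_card]
        omega
      · intro v hv; simp [PySem.Set.empty] at hv
      · intro v hv; simp [PySem.Set.empty] at hv
      · right; right; exact List.mem_cons_self

lemma B_iff (pos : Int × Int × Int) (cubes : List (Int × Int × Int)) (lo hi : Int) :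
    (extExposed_alt pos cubes lo hi = true ↔ Escape cubes lo hi pos) := by
  unfold extExposed_alt
  constructor
  · intro h
    exact B_sound cubes lo hi pos (pvFuelFor lo hi) pos PySem.Set.empty Reach.refl h
  · intro hE
    cases hB : dfsB cubes lo hi (pvFuelFor lo hi) pos PySem.Set.empty with
    | mk b v' =>
      cases b with
      | true => rfl
      | false =>
        exfalso
        have hfuel : pvRem lo hi PySem.Set.empty < pvFuelFor lo hi := by
          unfold pvRem PySem.Set.empty pvFuelFor
          simp only [List.toFinset_nil, Finset.sdiff_empty]
          rw [box_card]
          omega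
        obtain ⟨-, g1, hp1, cl1⟩ := B_complete cubes lo hi (pvFuelFor lo hi) pos PySem.Set.empty v' hfuel
          (by intro x hx; simp [PySem.Set.empty] at hx) hB
        refine closed_no_escape cubes lo hi pos v' g1 ?_ hp1 hE
        intro x hx n hn
        rcases cl1 x hx with h' | h'
        · simp [PySem.Set.empty] at h'
        · exact h' n hn

-- ===== VERDICT (by name: the statement is the Claim_ definition above) =====
theorem extExposed_spec : Claim_equal_extExposed := by
  intro pos cubes min_coord max_coord _
  unfold Spec_extExposed
  exact Bool.eq_iff_iff.mpr
    ((A_iff pos cubes min_coord max_coord).trans (B_iff pos cubes min_coord max_coord).symm)
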